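-- pv_equiv track=rewrite | github.com/petteriTeikari/obsidianTools | latex2md/filtering.py | quick_replace
-- ===== SOURCE A (Python) =====
-- def quick_replace(md_lines_out):
--
--     lines_out = []
--     for line in md_lines_out:
--         line = line.replace('{width="1\\columnwidth"}', '')
--         line = line.replace('{width="0.9\\columnwidth"}', '')
--         line = line.replace('{width="0.8\\columnwidth"}', '')
--         line = line.replace('{width="0.7\\columnwidth"}', '')
--         line = line.replace('{width="0.6\\columnwidth"}', '')
--         line = line.replace('{width="2.0\\columnwidth"}', '')
--         lines_out.append(line)
--
--     return lines_out
-- ===== SOURCE B (Python) =====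
-- # Single left-to-right scan per line instead of six sequential full-string replace passes.
--
-- PATTERNS = (
--     '{width="1\\columnwidth"}',
--     '{width="0.9\\columnwidth"}',
--     '{width="0.8\\columnwidth"}',
--     '{width="0.7\\columnwidth"}',
--     '{width="0.6\\columnwidth"}',
--     '{width="2.0\\columnwidth"}',
-- )
--
--
-- def _strip_widths(line):
--     res = []
--     i = 0
--     n = len(line)
--     while i < n:
--         for p in PATTERNS:
--             if line.startswith(p, i):
--                 i += len(p)
--                 break
--         else:
--             res.append(line[i])
--             i += 1
--     return ''.join(res)
--
--
-- def quick_replace(md_lines_out):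
--     return [_strip_widths(line) for line in md_lines_out]
-- ===== Notes on version B (the rewrite author's own statement) =====
-- stated objective: alternative
-- what changed: A makes six sequential full-string .replace passes per line; B makes one left-to-right scan per line that at each position strips whichever of the six width-attribute literals starts there, building the result in a single pass.
import Mathlib
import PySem

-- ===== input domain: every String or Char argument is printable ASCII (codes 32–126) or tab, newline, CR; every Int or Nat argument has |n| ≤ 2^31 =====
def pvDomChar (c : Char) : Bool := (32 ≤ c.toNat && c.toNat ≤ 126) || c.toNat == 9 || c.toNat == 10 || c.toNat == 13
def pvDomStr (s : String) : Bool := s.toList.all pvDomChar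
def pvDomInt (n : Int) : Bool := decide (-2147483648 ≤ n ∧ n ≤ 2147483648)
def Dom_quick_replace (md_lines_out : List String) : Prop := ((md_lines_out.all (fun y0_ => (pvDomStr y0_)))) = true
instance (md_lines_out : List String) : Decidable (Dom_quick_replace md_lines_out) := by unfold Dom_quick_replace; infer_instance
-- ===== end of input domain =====

-- B replaces A's six sequential full-string `.replace` passes per line by a single
-- left-to-right scan that strips whichever of the six width-attribute literals starts
-- at each position (objective: alternative single-pass algorithm of similar cost).


-- ===== PORT A =====
def quick_replace (md_lines_out : List String) : List String :=
  md_lines_out.foldl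
    (fun lines_out line =>
      let line1 := PySem.Str.replace line "{width=\"1\\columnwidth\"}" ""
      let line2 := PySem.Str.replace line1 "{width=\"0.9\\columnwidth\"}" ""
      let line3 := PySem.Str.replace line2 "{width=\"0.8\\columnwidth\"}" ""
      let line4 := PySem.Str.replace line3 "{width=\"0.7\\columnwidth\"}" ""
      let line5 := PySem.Str.replace line4 "{width=\"0.6\\columnwidth\"}" ""
      let line6 := PySem.Str.replace line5 "{width=\"2.0\\columnwidth\"}" ""
      lines_out ++ [line6]) []

-- ===== PORT B =====
-- Source B's PATTERNS tuple
def pvPatterns : List (List Char) :=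
  ["{width=\"1\\columnwidth\"}".toList,
   "{width=\"0.9\\columnwidth\"}".toList,
   "{width=\"0.8\\columnwidth\"}".toList,
   "{width=\"0.7\\columnwidth\"}".toList,
   "{width=\"0.6\\columnwidth\"}".toList,
   "{width=\"2.0\\columnwidth\"}".toList]

-- Source B's _strip_widths while-loop: at each position, skip the first matching pattern,
-- otherwise keep the character.  The `!p.isEmpty` conjunct is only a termination
-- guard (every pattern in pvPatterns is nonempty, so it never changes the result).
def pvScan (ps : List (List Char)) (s : List Char) : List Char :=
  match s with
  | [] => []
  | c :: t =>
    match h : ps.find? (fun p => !p.isEmpty && p.isPrefixOf (c :: t)) with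
    | some p => pvScan ps ((c :: t).drop p.length)
    | none => c :: pvScan ps t
termination_by s.length
decreasing_by
  · have hp := List.find?_some h
    simp only [Bool.and_eq_true, Bool.not_eq_true', List.isEmpty_eq_false_iff] at hp
    have : 0 < p.length := List.length_pos_iff.mpr hp.1
    simp only [List.length_drop, List.length_cons]
    omega
  · simp

def quick_replace_alt (md_lines_out : List String) : List String :=
  md_lines_out.map (fun line => String.ofList (pvScan pvPatterns line.toList))

-- ===== PRECONDITION & SPEC =====
-- an occurrence of one of the six width attributes at position i
abbrev pvOcc (s : List Char) (i : Nat) : Prop := ∃ p ∈ pvPatterns, p <+: s.drop i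

-- no '{' that does not itself start a width attribute is followed within 24
-- characters by a width-attribute occurrence
abbrev pvGood (s : List Char) : Prop :=
  ∀ i < s.length, (s.drop i).head? = some '{' → ¬ pvOcc s i →
    ∀ j < i + 25, i < j → ¬ pvOcc s j

-- Pre_ excludes lines in which a '{' that does not itself start one of the six width
-- attributes is followed within 24 characters by a width-attribute occurrence: on such
-- lines deleting one attribute can splice together a new one, and which spliced
-- attributes A removes is an accident of its hard-coded pass order (the bound
-- over-approximates, so some near-miss lines on which A and B agree are excluded too).
def Pre_quick_replace (md_lines_out : List String) : Prop :=
  ∀ l ∈ md_lines_out, pvGood l.toList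

instance (md_lines_out : List String) : Decidable (Pre_quick_replace md_lines_out) := by
  unfold Pre_quick_replace; infer_instance

def pvWitness_quick_replace : List String := ["a{width=\"0.9\\columnwidth\"}b"]

def Spec_quick_replace (md_lines_out : List String) (out : List String) : Prop :=
  out = quick_replace_alt md_lines_out
instance (md_lines_out : List String) (out : List String) : Decidable (Spec_quick_replace md_lines_out out) := by unfold Spec_quick_replace; infer_instance

-- ===== CLAIM (what is proved, stated in full; the proofs are below) =====
def Claim_equal_quick_replace : Prop := ∀ (md_lines_out : List String), Dom_quick_replace md_lines_out → Pre_quick_replace md_lines_out → Spec_quick_replace md_lines_out (quick_replace md_lines_out)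

-- ===== LEMMAS AND PROOFS =====

-- structure facts about the six patterns, all by computation
theorem pvPat_ne_nil : ∀ p ∈ pvPatterns, p ≠ [] := by decide
theorem pvPat_len : ∀ p ∈ pvPatterns, p.length = 23 ∨ p.length = 25 := by decide
theorem pvPat_head : ∀ p ∈ pvPatterns, p.head? = some '{' := by decide
theorem pvPat_nobrace : ∀ p ∈ pvPatterns, ∀ o < p.length, 0 < o → p[o]? ≠ some '{' := by decide
theorem pvPat_take23 : ∀ p ∈ pvPatterns, ∀ q ∈ pvPatterns, p.take 23 = q.take 23 → p = q := by decide

-- unfolding equations for pvScan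
theorem pvScan_nil (ps : List (List Char)) : pvScan ps [] = [] := by
  rw [pvScan]

theorem pvScan_cons_some {ps : List (List Char)} {c : Char} {t p : List Char}
    (h : ps.find? (fun p => !p.isEmpty && p.isPrefixOf (c :: t)) = some p) :
    pvScan ps (c :: t) = pvScan ps ((c :: t).drop p.length) := by
  rw [pvScan, h]

theorem pvScan_cons_none {ps : List (List Char)} {c : Char} {t : List Char}
    (h : ps.find? (fun p => !p.isEmpty && p.isPrefixOf (c :: t)) = none) :
    pvScan ps (c :: t) = c :: pvScan ps t := by
  rw [pvScan, h]

-- small prefix facts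
theorem prefix_append_of_le {α : Type} {x a b : List α} (h : x <+: a ++ b)
    (hle : x.length ≤ a.length) : x <+: a :=
  List.prefix_of_prefix_length_le h (List.prefix_append a b) hle

theorem head?_of_prefix {p x : List Char} {a : Char} (h : p <+: x)
    (hh : p.head? = some a) : x.head? = some a := by
  obtain ⟨z, rfl⟩ := h
  cases p with
  | nil => simp at hh
  | cons b u => simp_all

theorem take_eq_of_prefix {α : Type} {x y : List α} (h : x <+: y) {n : Nat}
    (hn : n ≤ x.length) : x.take n = y.take n := by
  rw [List.prefix_iff_eq_take.mp h, List.take_take, min_eq_left hn]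

theorem getElem?_of_prefix {α : Type} {x y : List α} (h : x <+: y) {n : Nat}
    (hn : n < x.length) : y[n]? = x[n]? := by
  obtain ⟨z, rfl⟩ := h
  exact List.getElem?_append_left hn

-- pvScan copies any match-free prefix verbatim
theorem pvScan_skip {ps : List (List Char)} (m : Nat) :
    ∀ s : List Char, (∀ u < m, ∀ p ∈ ps, ¬ p <+: s.drop u) →
    pvScan ps s = s.take m ++ pvScan ps (s.drop m) := by
  induction m with
  | zero => intro s _; simp
  | succ m ih =>
    intro s hs
    cases s with
    | nil => simp [pvScan_nil]
    | cons c t =>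
      have h0 : ps.find? (fun p => !p.isEmpty && p.isPrefixOf (c :: t)) = none := by
        rw [List.find?_eq_none]
        intro p hp hcon
        rw [Bool.and_eq_true, List.isPrefixOf_iff_prefix] at hcon
        exact hs 0 (by omega) p hp (by simpa using hcon.2)
      rw [pvScan_cons_none h0,
        ih t (fun u hu p hp hpre => hs (u+1) (by omega) p hp (by simpa using hpre))]
      simp

theorem pvScan_id {ps : List (List Char)} (s : List Char)
    (h : ∀ u, ∀ p ∈ ps, ¬ p <+: s.drop u) : pvScan ps s = s := by
  have := pvScan_skip s.length s (fun u _ p hp => h u p hp)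
  simpa [pvScan_nil] using this

-- pvGood is closed under dropping a prefix
theorem pvGood_drop {s : List Char} (h : pvGood s) (m : Nat) : pvGood (s.drop m) := by
  intro i hi hh ho j hj hij
  rw [List.drop_drop] at hh
  have hi' : m + i < s.length := by rw [List.length_drop] at hi; omega
  have ho' : ¬ pvOcc s (m + i) := by
    rintro ⟨p, hp, hpre⟩
    exact ho ⟨p, hp, by rw [List.drop_drop]; exact hpre⟩
  rintro ⟨p, hp, hpre⟩
  rw [List.drop_drop] at hpre
  exact h (m+i) hi' hh ho' (m+j) (by omega) (by omega) ⟨p, hp, hpre⟩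

-- the key step: on good input, one extra single-pattern pass over the multi-pass
-- result equals the multi-pass with the pattern appended
theorem pvStep {ps : List (List Char)} {q : List Char}
    (hps : ∀ p ∈ ps, p ∈ pvPatterns) (hq : q ∈ pvPatterns) :
    ∀ (n : Nat) (s : List Char), s.length ≤ n → pvGood s →
      pvScan [q] (pvScan ps s) = pvScan (ps ++ [q]) s := by
  have hqne : q ≠ [] := pvPat_ne_nil q hq
  intro n
  induction n with
  | zero =>
    intro s hlen _
    have : s = [] := by cases s <;> simp_all
    subst this
    simp [pvScan_nil]
  | succ n ih =>
    intro s hlen hg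
    cases s with
    | nil => simp [pvScan_nil]
    | cons c t =>
      cases hf : ps.find? (fun p => !p.isEmpty && p.isPrefixOf (c :: t)) with
      | some p =>
        have hpmem : p ∈ pvPatterns := hps p (List.mem_of_find?_eq_some hf)
        have hplen : 0 < p.length := List.length_pos_iff.mpr (pvPat_ne_nil p hpmem)
        have hf2 : (ps ++ [q]).find? (fun p => !p.isEmpty && p.isPrefixOf (c :: t)) = some p := by
          rw [List.find?_append, hf]; rfl
        rw [pvScan_cons_some hf, pvScan_cons_some hf2]
        refine ih _ ?_ (pvGood_drop hg _)
        simp only [List.length_drop, List.length_cons] at *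
        omega
      | none =>
        by_cases hqm : q <+: (c :: t)
        · -- case b: the appended pattern matches at the head
          have hpq : (!q.isEmpty && q.isPrefixOf (c :: t)) = true := by
            rw [Bool.and_eq_true, List.isPrefixOf_iff_prefix]
            exact ⟨by simp [hqne], hqm⟩
          have hf2 : (ps ++ [q]).find? (fun p => !p.isEmpty && p.isPrefixOf (c :: t)) = some q := by
            rw [List.find?_append, hf, Option.none_or, List.find?_cons, hpq]
          rw [pvScan_cons_some hf2]
          obtain ⟨w, hw⟩ := hqm
          have hskip : ∀ u < q.length, ∀ p ∈ ps, ¬ p <+: (c :: t).drop u := by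
            intro u hu p hpmem hpre
            cases u with
            | zero =>
              have hnone := List.find?_eq_none.mp hf p hpmem
              rw [Bool.and_eq_true, List.isPrefixOf_iff_prefix] at hnone
              exact hnone ⟨by simp [pvPat_ne_nil p (hps p hpmem)], by simpa using hpre⟩
            | succ v =>
              have h1 : ((c :: t).drop (v+1)).head? = some '{' :=
                head?_of_prefix hpre (pvPat_head p (hps p hpmem))
              rw [List.head?_drop] at h1
              have h2 : (c :: t)[v+1]? = q[v+1]? := by
                rw [← hw]; exact List.getElem?_append_left hu
              exact pvPat_nobrace q hq (v+1) hu (by omega) (by rw [← h2]; exact h1)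
          have hY := pvScan_skip q.length (c :: t) hskip
          rw [← hw, List.take_left, List.drop_left] at hY
          have hwlen : w.length ≤ n := by
            have hqlen : 0 < q.length := List.length_pos_iff.mpr hqne
            have hl2 : (q ++ w).length = (c :: t).length := by rw [hw]
            simp only [List.length_append, List.length_cons] at hl2
            simp only [List.length_cons] at hlen
            omega
          have hgw : pvGood w := by
            have := pvGood_drop hg q.length
            rw [← hw, List.drop_left] at this
            exact this
          have heval : ∀ X : List Char, pvScan [q] (q ++ X) = pvScan [q] X := by
            intro X
            obtain ⟨qh, qt, hq'⟩ : ∃ qh qt, q = qh :: qt := by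
              cases q with
              | nil => exact absurd rfl hqne
              | cons a b => exact ⟨a, b, rfl⟩
            have hcons : q ++ X = qh :: (qt ++ X) := by rw [hq']; rfl
            have hfq : ([q].find? (fun p => !p.isEmpty && p.isPrefixOf (qh :: (qt ++ X)))) = some q := by
              rw [List.find?_cons]
              have hpq2 : (!q.isEmpty && q.isPrefixOf (qh :: (qt ++ X))) = true := by
                rw [Bool.and_eq_true, List.isPrefixOf_iff_prefix]
                refine ⟨by simp [hqne], ?_⟩
                rw [← hcons]
                exact List.prefix_append q X
              rw [hpq2]
            rw [hcons, pvScan_cons_some hfq, ← hcons, List.drop_left]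
          rw [← hw, hY, heval, List.drop_left]
          exact ih w hwlen hgw
        · -- case c: neither the old patterns nor the appended one match at the head
          have hqfalse : (!q.isEmpty && q.isPrefixOf (c :: t)) = false := by
            have hb : q.isPrefixOf (c :: t) = false := by
              cases hcases : q.isPrefixOf (c :: t) with
              | false => rfl
              | true => exact absurd (List.isPrefixOf_iff_prefix.mp hcases) hqm
            simp [hb]
          have hf2 : (ps ++ [q]).find? (fun p => !p.isEmpty && p.isPrefixOf (c :: t)) = none := by
            rw [List.find?_append, hf, Option.none_or, List.find?_cons, hqfalse]
            rfl
          rw [pvScan_cons_none hf, pvScan_cons_none hf2]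
          have hgt : pvGood t := by simpa using pvGood_drop hg 1
          have htlen : t.length ≤ n := by simp only [List.length_cons] at hlen; omega
          by_cases hcasc : q <+: (c :: pvScan ps t)
          · exfalso
            obtain ⟨qh, qt, hq'⟩ : ∃ qh qt, q = qh :: qt := by
              cases q with
              | nil => exact absurd rfl hqne
              | cons a b => exact ⟨a, b, rfl⟩
            have hqh : qh = '{' := by
              have := pvPat_head q hq; rw [hq'] at this; simpa using this
            obtain ⟨z, hz⟩ := hcasc
            rw [hq'] at hz
            simp only [List.cons_append, List.cons.injEq] at hz
            obtain ⟨hc, hz2⟩ := hz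
            -- hc : qh = c, hz2 : qt ++ z = pvScan ps t
            have hq'pre : qt <+: pvScan ps t := ⟨z, hz2⟩
            by_cases hAll : ∀ u, ∀ p ∈ ps, ¬ p <+: t.drop u
            · rw [pvScan_id t hAll] at hz2
              exact hqm (by rw [hq', ← hc]; exact ⟨z, by rw [List.cons_append, hz2]⟩)
            · push Not at hAll
              have hex : ∃ u, ∃ p ∈ ps, p <+: t.drop u := hAll
              have ht0 := Nat.find_spec hex
              have hmin : ∀ u < Nat.find hex, ¬ ∃ p ∈ ps, p <+: t.drop u :=
                fun u hu => Nat.find_min hex hu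
              set t0 := Nat.find hex with ht0def
              obtain ⟨pj, hpjmem, hpjpre⟩ := ht0
              have hpjpat : pj ∈ pvPatterns := hps pj hpjmem
              have hpjne : pj ≠ [] := pvPat_ne_nil pj hpjpat
              have ht0lt : t0 < t.length := by
                by_contra hge
                push Not at hge
                rw [List.drop_eq_nil_of_le hge] at hpjpre
                exact hpjne (List.prefix_nil.mp hpjpre)
              have hYskip := pvScan_skip t0 t (fun u hu p hpm hpre => hmin u hu ⟨p, hpm, hpre⟩)
              have hql : q.length = 23 ∨ q.length = 25 := pvPat_len q hq
              have hqlen' : q.length = qt.length + 1 := by rw [hq']; rfl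
              by_cases hbig : q.length ≤ t0 + 1
              · have h1 : qt <+: t.take t0 := by
                  refine prefix_append_of_le (b := pvScan ps (t.drop t0)) ?_ ?_
                  · rw [← hYskip]; exact hq'pre
                  · rw [List.length_take]; omega
                have h2 : qt <+: t := h1.trans (List.take_prefix _ _)
                exact hqm (by rw [hq', ← hc]; exact (List.cons_prefix_cons).mpr ⟨rfl, h2⟩)
              · push Not at hbig
                have hocc1 : pvOcc (c :: t) (t0 + 1) :=
                  ⟨pj, hpjpat, by simpa using hpjpre⟩
                by_cases hM : pvOcc (c :: t) 0
                · obtain ⟨m, hmpat, hmpre0⟩ := hM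
                  have hmpre : m <+: c :: t := by simpa using hmpre0
                  have hmlen : m.length ≤ t0 + 1 := by
                    by_contra hlt
                    push Not at hlt
                    have hbr : (c :: t)[t0+1]? = some '{' := by
                      have h1 : ((c :: t).drop (t0+1)).head? = some '{' :=
                        head?_of_prefix (by simpa using hpjpre) (pvPat_head pj hpjpat)
                      rw [List.head?_drop] at h1; exact h1
                    have he := getElem?_of_prefix hmpre (n := t0+1) hlt
                    exact pvPat_nobrace m hmpat (t0+1) hlt (by omega) (by rw [← he]; exact hbr)
                  have hm23 : m.length = 23 := by
                    rcases pvPat_len m hmpat with h'|h' <;> omega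
                  have ht022 : 22 ≤ t0 := by omega
                  have hqt22 : 22 ≤ qt.length := by omega
                  have htake22 : qt.take 22 = t.take 22 := by
                    have e1 : qt.take 22 = (pvScan ps t).take 22 :=
                      take_eq_of_prefix hq'pre hqt22
                    have e2 : (pvScan ps t).take 22 = (t.take t0).take 22 := by
                      rw [hYskip]
                      rw [List.take_append_of_le_length (by rw [List.length_take]; omega)]
                    have e3 : (t.take t0).take 22 = t.take 22 := by
                      rw [List.take_take]; congr 1; omega
                    rw [e1, e2, e3]
                  obtain ⟨mh, mt, hm'⟩ : ∃ mh mt, m = mh :: mt := by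
                    cases m with
                    | nil => exact absurd rfl (pvPat_ne_nil [] hmpat)
                    | cons a b => exact ⟨a, b, rfl⟩
                  have hmh : mh = '{' := by
                    have := pvPat_head m hmpat; rw [hm'] at this; simpa using this
                  have hmcopy := hmpre
                  obtain ⟨z2, hz2'⟩ := hmcopy
                  rw [hm'] at hz2'
                  simp only [List.cons_append, List.cons.injEq] at hz2'
                  obtain ⟨hmc, hmt'⟩ := hz2'
                  have hmtlen : mt.length = 22 := by
                    have : m.length = mt.length + 1 := by rw [hm']; rfl
                    omega
                  have hmt22 : mt = t.take 22 := by
                    have := List.prefix_iff_eq_take.mp (⟨z2, hmt'⟩ : mt <+: t)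
                    rw [hmtlen] at this; exact this
                  have htk : q.take 23 = m.take 23 := by
                    rw [hq', hm']
                    show qh :: qt.take 22 = mh :: mt.take 22
                    rw [hqh, hmh, htake22, hmt22, List.take_take]
                    norm_num
                  have hqm' : q = m := pvPat_take23 q hq m hmpat htk
                  exact hqm (hqm' ▸ hmpre)
                · have hhead : ((c :: t).drop 0).head? = some '{' := by
                    simp [← hc, hqh]
                  exact hg 0 (by simp) hhead hM (t0+1) (by omega) (by omega) hocc1
          · have hfq : ([q].find? (fun p => !p.isEmpty && p.isPrefixOf (c :: pvScan ps t))) = none := by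
              rw [List.find?_cons]
              have : (!q.isEmpty && q.isPrefixOf (c :: pvScan ps t)) = false := by
                have hb : q.isPrefixOf (c :: pvScan ps t) = false := by
                  cases hcases : q.isPrefixOf (c :: pvScan ps t) with
                  | false => rfl
                  | true => exact absurd (List.isPrefixOf_iff_prefix.mp hcases) hcasc
                simp [hb]
              rw [this]
              rfl
            rw [pvScan_cons_none hfq, ih t htlen hgt]

-- chaining the six passes
theorem line_eq (l : List Char) (h : pvGood l) :
    pvScan ["{width=\"2.0\\columnwidth\"}".toList]
      (pvScan ["{width=\"0.6\\columnwidth\"}".toList]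
        (pvScan ["{width=\"0.7\\columnwidth\"}".toList]
          (pvScan ["{width=\"0.8\\columnwidth\"}".toList]
            (pvScan ["{width=\"0.9\\columnwidth\"}".toList]
              (pvScan ["{width=\"1\\columnwidth\"}".toList] l))))) =
    pvScan pvPatterns l := by
  rw [pvStep (by decide) (by decide) l.length l le_rfl h]
  simp only [List.cons_append, List.nil_append]
  rw [pvStep (by decide) (by decide) l.length l le_rfl h]
  simp only [List.cons_append, List.nil_append]
  rw [pvStep (by decide) (by decide) l.length l le_rfl h]
  simp only [List.cons_append, List.nil_append]
  rw [pvStep (by decide) (by decide) l.length l le_rfl h]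
  simp only [List.cons_append, List.nil_append]
  rw [pvStep (by decide) (by decide) l.length l le_rfl h]
  simp only [List.cons_append, List.nil_append]
  rfl

-- replaceAll of one nonempty pattern by "" is the single-pattern scan
theorem replace_go_spec (old : List Char) (h : old ≠ []) :
    ∀ (fuel : Nat) (l acc : List Char), l.length ≤ fuel →
    PySem.Chars.replace.go old [] fuel l acc = acc.reverse ++ pvScan [old] l := by
  intro fuel
  induction fuel with
  | zero =>
    intro l acc hl
    have : l = [] := by cases l <;> simp_all
    subst this
    simp [PySem.Chars.replace.go, pvScan_nil]
  | succ n ih =>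
    intro l acc hl
    cases l with
    | nil => simp [PySem.Chars.replace.go, pvScan_nil]
    | cons c t =>
      by_cases hpre : old.isPrefixOf (c :: t) = true
      · have hfind : ([old].find? (fun p => !p.isEmpty && p.isPrefixOf (c :: t))) = some old := by
          rw [List.find?_cons]
          have : (!old.isEmpty && old.isPrefixOf (c :: t)) = true := by
            rw [Bool.and_eq_true]; exact ⟨by simp [h], hpre⟩
          rw [this]
        rw [pvScan_cons_some hfind]
        have hstep : PySem.Chars.replace.go old [] (n+1) (c :: t) acc
            = PySem.Chars.replace.go old [] n ((c :: t).drop old.length) acc := by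
          rw [PySem.Chars.replace.go, if_pos hpre]
          rfl
        have hlen2 : ((c :: t).drop old.length).length ≤ n := by
          have : 0 < old.length := List.length_pos_iff.mpr h
          simp only [List.length_drop, List.length_cons] at *
          omega
        rw [hstep, ih _ _ hlen2]
      · have hfind : ([old].find? (fun p => !p.isEmpty && p.isPrefixOf (c :: t))) = none := by
          rw [List.find?_cons]
          have : (!old.isEmpty && old.isPrefixOf (c :: t)) = false := by
            simp [hpre]
          rw [this]
          rfl
        have hstep : PySem.Chars.replace.go old [] (n+1) (c :: t) acc
            = PySem.Chars.replace.go old [] n t (c :: acc) := by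
          rw [PySem.Chars.replace.go, if_neg hpre]
        rw [pvScan_cons_none hfind, hstep,
          ih t (c :: acc) (by simp only [List.length_cons] at hl; omega)]
        simp

theorem replace_eq_scan (s old : List Char) (h : old ≠ []) :
    PySem.Chars.replace s old [] = pvScan [old] s := by
  unfold PySem.Chars.replace
  rw [if_neg (by simp [h])]
  simpa using replace_go_spec old h s.length s [] le_rfl

theorem str_replace_empty (x pat : String) (hne : pat.toList ≠ []) :
    PySem.Str.replace x pat "" = String.ofList (pvScan [pat.toList] x.toList) := by
  unfold PySem.Str.replace
  rw [show ("" : String).toList = [] from rfl, replace_eq_scan _ _ hne]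

theorem str_replace_empty' (y : List Char) (pat : String) (hne : pat.toList ≠ []) :
    PySem.Str.replace (String.ofList y) pat "" = String.ofList (pvScan [pat.toList] y) := by
  rw [str_replace_empty _ _ hne, String.toList_ofList]

-- the six sequential replace passes of A equal B's one scan, per line
theorem lineA (s : String) (h : pvGood s.toList) :
    PySem.Str.replace (PySem.Str.replace (PySem.Str.replace (PySem.Str.replace (PySem.Str.replace (PySem.Str.replace s "{width=\"1\\columnwidth\"}" "") "{width=\"0.9\\columnwidth\"}" "") "{width=\"0.8\\columnwidth\"}" "") "{width=\"0.7\\columnwidth\"}" "") "{width=\"0.6\\columnwidth\"}" "") "{width=\"2.0\\columnwidth\"}" ""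
    = String.ofList (pvScan pvPatterns s.toList) := by
  rw [str_replace_empty s _ (by decide)]
  rw [str_replace_empty' _ _ (by decide)]
  rw [str_replace_empty' _ _ (by decide)]
  rw [str_replace_empty' _ _ (by decide)]
  rw [str_replace_empty' _ _ (by decide)]
  rw [str_replace_empty' _ _ (by decide)]
  rw [line_eq s.toList h]

-- ===== VERDICT (by name: the statement is the Claim_ definition above) =====
theorem quick_replace_spec : Claim_equal_quick_replace := by
  unfold Claim_equal_quick_replace
  intro md _ hPre
  unfold Spec_quick_replace quick_replace quick_replace_alt
  have hfold : ∀ (L : List String), (∀ l ∈ L, pvGood l.toList) → ∀ acc : List String,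
      L.foldl
        (fun lines_out line =>
          let line1 := PySem.Str.replace line "{width=\"1\\columnwidth\"}" ""
          let line2 := PySem.Str.replace line1 "{width=\"0.9\\columnwidth\"}" ""
          let line3 := PySem.Str.replace line2 "{width=\"0.8\\columnwidth\"}" ""
          let line4 := PySem.Str.replace line3 "{width=\"0.7\\columnwidth\"}" ""
          let line5 := PySem.Str.replace line4 "{width=\"0.6\\columnwidth\"}" ""
          let line6 := PySem.Str.replace line5 "{width=\"2.0\\columnwidth\"}" ""
          lines_out ++ [line6]) acc
      = acc ++ L.map (fun line => String.ofList (pvScan pvPatterns line.toList)) := by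
    intro L
    induction L with
    | nil => intro _ acc; simp
    | cons x xs ih =>
      intro hP acc
      rw [List.foldl_cons, ih (fun l hl => hP l (List.mem_cons_of_mem _ hl))]
      have hx := lineA x (hP x List.mem_cons_self)
      show (acc ++ [PySem.Str.replace (PySem.Str.replace (PySem.Str.replace (PySem.Str.replace (PySem.Str.replace (PySem.Str.replace x "{width=\"1\\columnwidth\"}" "") "{width=\"0.9\\columnwidth\"}" "") "{width=\"0.8\\columnwidth\"}" "") "{width=\"0.7\\columnwidth\"}" "") "{width=\"0.6\\columnwidth\"}" "") "{width=\"2.0\\columnwidth\"}" ""]) ++ _ = _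
    
      rw [hx, List.map_cons, List.append_assoc]
      rfl
  rw [hfold md hPre []]
  simp
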